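-- pv_equiv track=rewrite | github.com/jeiros/advent-of-code-2017 | day_10/solution.py | apply_hash
-- ===== SOURCE A (Python) =====
-- def apply_hash(input_list, length, current_pos):
--     copy_input_list = [i for i in input_list]
--     if length > len(input_list):
--         raise ValueError('length is > than len(input_list)')
--
--     list_to_reverse = []
--     i = current_pos % len(input_list)
--     while len(list_to_reverse) < length:
--         list_to_reverse.append(copy_input_list[i])
--         i += 1
--         if i >= len(copy_input_list):
--             i = 0
--     reversed_list = list(reversed(list_to_reverse))
--
--     i = current_pos % len(input_list)
--     for j in range(len(reversed_list)):
--         copy_input_list[i] = reversed_list[j]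
--         i += 1
--         if i >= len(copy_input_list):
--             i = 0
--
--     return copy_input_list
-- ===== SOURCE B (Python) =====
-- def apply_hash(input_list, length, current_pos):
--     n = len(input_list)
--     if length > n:
--         raise ValueError('length is > than len(input_list)')
--     start = current_pos % n
--     rotated = input_list[start:] + input_list[:start]
--     if length > 0:
--         rotated[:length] = reversed(rotated[:length])
--     return rotated[n - start:] + rotated[:n - start]
-- ===== Notes on version B (the rewrite author's own statement) =====
-- stated objective: simpler
-- what changed: Replaces the two circular index-walking loops (a while loop collecting elements with manual wrap-around, then a for loop writing them back) by rotate-to-front slicing: rotate the list so the window starts at index 0, reverse the front slice, rotate back.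
import Mathlib
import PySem

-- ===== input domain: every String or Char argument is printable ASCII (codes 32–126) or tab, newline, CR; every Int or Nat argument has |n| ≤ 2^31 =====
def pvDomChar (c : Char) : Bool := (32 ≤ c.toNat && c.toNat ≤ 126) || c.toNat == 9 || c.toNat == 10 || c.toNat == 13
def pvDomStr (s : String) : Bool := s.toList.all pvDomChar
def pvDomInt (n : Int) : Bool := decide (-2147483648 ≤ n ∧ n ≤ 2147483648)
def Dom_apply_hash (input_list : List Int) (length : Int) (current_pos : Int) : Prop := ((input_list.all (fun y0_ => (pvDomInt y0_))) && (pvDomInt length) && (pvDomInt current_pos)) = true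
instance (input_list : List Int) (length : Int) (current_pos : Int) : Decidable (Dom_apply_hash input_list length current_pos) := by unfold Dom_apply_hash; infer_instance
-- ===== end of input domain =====

-- B replaces A's two circular index-walking loops by rotate/reverse-slice/rotate-back; objective: simpler.


-- ===== PORT A =====
-- the while loop: append copy[i]; i += 1; wrap to 0 at the end; fuel = number of
-- elements still to collect (length.toNat, as the loop runs max(length,0) times).
-- copy.getD i 0: Python's copy_input_list[i]; on every input admitted by Pre_ the
-- index i is always < len, so Python never raises here.
def pvCollect (copy : List Int) : Nat → Nat → List Int
  | _, 0 => []
  | i, Nat.succ k =>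
    copy.getD i 0 :: pvCollect copy (if i + 1 ≥ copy.length then 0 else i + 1) k

-- the for loop writing reversed_list back circularly: copy[i] = v; i += 1; wrap.
def pvWrite : List Int → Nat → List Int → List Int
  | acc, _, [] => acc
  | acc, i, v :: rest => pvWrite (acc.set i v) (if i + 1 ≥ acc.length then 0 else i + 1) rest

def apply_hash (input_list : List Int) (length : Int) (current_pos : Int) : List Int :=
  -- ValueError (length > len) and ZeroDivisionError (empty list) are excluded by
  -- Pre_apply_hash; the port returns [] on those inputs.
  if length > (input_list.length : Int) ∨ input_list = [] then []
  else
    let i0 := (PySem.Int.mod current_pos (input_list.length : Int)).toNat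
    let reversed_list := (pvCollect input_list i0 length.toNat).reverse
    pvWrite input_list i0 reversed_list

-- ===== PORT B =====
def apply_hash_alt (input_list : List Int) (length : Int) (current_pos : Int) : List Int :=
  -- same raising inputs as A, excluded by Pre_apply_hash; [] there.
  if length > (input_list.length : Int) ∨ input_list = [] then []
  else
    let n := input_list.length
    let start := (PySem.Int.mod current_pos (n : Int)).toNat
    -- slices with indices in [0, n] are exactly take/drop
    let rotated := input_list.drop start ++ input_list.take start
    let rotated2 := if length > 0 then
        (rotated.take length.toNat).reverse ++ rotated.drop length.toNat
      else rotated
    rotated2.drop (n - start) ++ rotated2.take (n - start)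

-- ===== PRECONDITION & SPEC =====
-- Pre_ excludes exactly the inputs where A raises: length > len(input_list)
-- (ValueError) and the empty list (ZeroDivisionError from current_pos % 0).
def Pre_apply_hash (input_list : List Int) (length : Int) (current_pos : Int) : Prop :=
  input_list ≠ [] ∧ length ≤ (input_list.length : Int)
instance (input_list : List Int) (length : Int) (current_pos : Int) : Decidable (Pre_apply_hash input_list length current_pos) := by unfold Pre_apply_hash; infer_instance

def pvWitness_apply_hash : List Int × Int × Int := ([1, 2, 3, 4, 5], 3, 7)

def Spec_apply_hash (input_list : List Int) (length : Int) (current_pos : Int) (out : List Int) : Prop := out = apply_hash_alt input_list length current_pos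
instance (input_list : List Int) (length : Int) (current_pos : Int) (out : List Int) : Decidable (Spec_apply_hash input_list length current_pos out) := by unfold Spec_apply_hash; infer_instance

-- ===== CLAIM (what is proved, stated in full; the proofs are below) =====
def Claim_equal_apply_hash : Prop := ∀ (input_list : List Int) (length : Int) (current_pos : Int), Dom_apply_hash input_list length current_pos → Pre_apply_hash input_list length current_pos → Spec_apply_hash input_list length current_pos (apply_hash input_list length current_pos)

-- ===== LEMMAS AND PROOFS =====

theorem pvWrite_length (rev : List Int) (xs : List Int) (s : Nat) :
    (pvWrite xs s rev).length = xs.length := by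
  induction rev generalizing xs s with
  | nil => rfl
  | cons v rest ih => simp [pvWrite, ih]

-- A's collecting while loop reads the rotation's first k elements.
theorem pvCollect_eq (k : Nat) : ∀ (xs : List Int) (s : Nat), s < xs.length →
    k ≤ xs.length → pvCollect xs s k = (xs.rotate s).take k := by
  induction k with
  | zero => intro xs s _ _; simp [pvCollect]
  | succ k ih =>
    intro xs s hs hk
    have hn : 0 < xs.length := Nat.lt_of_le_of_lt (Nat.zero_le _) hs
    have hrotlen : (xs.rotate s).length = xs.length := List.length_rotate ..
    -- xs.rotate s = xs[s] :: T with T = xs.drop (s+1) ++ xs.take s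
    have hrot : xs.rotate s = xs[s] :: (xs.drop (s + 1) ++ xs.take s) := by
      rw [List.rotate_eq_drop_append_take (Nat.le_of_lt hs),
          List.drop_eq_getElem_cons hs, List.cons_append]
    have hs' : (if s + 1 ≥ xs.length then 0 else s + 1) = (s + 1) % xs.length := by
      rcases Nat.lt_or_ge (s + 1) xs.length with h | h
      · simp [Nat.not_le.mpr h, Nat.mod_eq_of_lt h]
      · have h1 : s + 1 = xs.length := by omega
        simp [h1]
    have hrot1 : xs.rotate (s + 1) = (xs.drop (s + 1) ++ xs.take s) ++ [xs[s]] := by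
      have := List.rotate_rotate xs s 1
      rw [hrot] at this
      rw [← this, List.rotate_cons_succ, List.rotate_zero]
    have hTlen : (xs.drop (s + 1) ++ xs.take s).length = xs.length - 1 := by
      simp; omega
    calc pvCollect xs s (k + 1)
        = xs.getD s 0 :: pvCollect xs ((s + 1) % xs.length) k := by
          rw [pvCollect, hs']
      _ = xs[s] :: (xs.rotate ((s + 1) % xs.length)).take k := by
          rw [List.getD_eq_getElem _ _ hs,
              ih xs ((s + 1) % xs.length) (Nat.mod_lt _ hn) (Nat.le_of_succ_le hk)]
      _ = (xs.rotate s).take (k + 1) := by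
          rw [List.rotate_mod, hrot1, hrot, List.take_succ_cons,
              List.take_append_of_le_length (by omega)]

-- A's write-back for loop, seen after rotating the result by s.
theorem pvWrite_rotate (rev : List Int) : ∀ (xs : List Int) (s : Nat),
    s < xs.length → rev.length ≤ xs.length →
    (pvWrite xs s rev).rotate s = rev ++ (xs.rotate s).drop rev.length := by
  induction rev with
  | nil => intro xs s _ _; simp [pvWrite]
  | cons v rest ih =>
    intro xs s hs hlen
    have hn : 0 < xs.length := Nat.lt_of_le_of_lt (Nat.zero_le _) hs
    have hsetlen : (xs.set s v).length = xs.length := by simp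
    have hs' : (if s + 1 ≥ xs.length then 0 else s + 1) = (s + 1) % xs.length := by
      rcases Nat.lt_or_ge (s + 1) xs.length with h | h
      · simp [Nat.not_le.mpr h, Nat.mod_eq_of_lt h]
      · have h1 : s + 1 = xs.length := by omega
        simp [h1]
    set T := xs.drop (s + 1) ++ xs.take s with hT
    have hrot : xs.rotate s = xs[s] :: T := by
      rw [List.rotate_eq_drop_append_take (Nat.le_of_lt hs),
          List.drop_eq_getElem_cons hs, hT, List.cons_append]
    have hTlen : T.length = xs.length - 1 := by
      simp [hT]; omega
    -- (xs.set s v).rotate s = v :: T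
    have hsetrot : (xs.set s v).rotate s = v :: T := by
      rw [List.rotate_eq_drop_append_take (by rw [hsetlen]; exact Nat.le_of_lt hs)]
      rw [List.drop_set, List.take_set_of_le (Nat.le_refl s),
          if_neg (lt_irrefl s), Nat.sub_self,
          List.drop_eq_getElem_cons hs, List.set_cons_zero, hT, List.cons_append]
    have hsetrot1 : (xs.set s v).rotate (s + 1) = T ++ [v] := by
      have := List.rotate_rotate (xs.set s v) s 1
      rw [hsetrot] at this
      rw [← this, List.rotate_cons_succ, List.rotate_zero]
    set R := pvWrite (xs.set s v) ((s + 1) % xs.length) rest with hR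
    have hih : R.rotate ((s + 1) % xs.length) = rest ++ ((xs.set s v).rotate ((s + 1) % xs.length)).drop rest.length := by
      apply ih
      · rw [hsetlen]; exact Nat.mod_lt _ hn
      · rw [hsetlen]; exact Nat.le_of_succ_le (by simpa using hlen)
    have hrestT : rest.length ≤ T.length := by
      rw [hTlen]; simpa using Nat.le_sub_one_of_lt (Nat.lt_of_lt_of_le (by simp) hlen)
    have hRlen : R.length = xs.length := by rw [hR, pvWrite_length, hsetlen]
    have hRs1 : R.rotate (s + 1) = (rest ++ T.drop rest.length) ++ [v] := by
      have e1 : R.rotate (s + 1) = R.rotate ((s + 1) % xs.length) := by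
        rw [← hRlen]; exact (List.rotate_mod R (s + 1)).symm
      have e2 : (xs.set s v).rotate ((s + 1) % xs.length) = (xs.set s v).rotate (s + 1) := by
        rw [← hsetlen]; exact List.rotate_mod ..
      rw [e1, hih, e2, hsetrot1, List.drop_append_of_le_length hrestT, List.append_assoc]
    -- goal value G and its rotate-by-1
    have hgoal : R.rotate s = v :: (rest ++ T.drop rest.length) := by
      have h1 : (R.rotate s).rotate 1 = R.rotate (s + 1) := List.rotate_rotate ..
      have h2 : (v :: (rest ++ T.drop rest.length)).rotate 1
          = (rest ++ T.drop rest.length) ++ [v] := by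
        rw [List.rotate_cons_succ, List.rotate_zero]
      apply List.rotate_injective 1
      show (R.rotate s).rotate 1 = (v :: (rest ++ List.drop rest.length T)).rotate 1
      rw [h1, hRs1, h2]
    calc (pvWrite xs s (v :: rest)).rotate s
        = R.rotate s := by rw [pvWrite, hs', hR]
      _ = (v :: rest) ++ (xs.rotate s).drop (v :: rest).length := by
          rw [hgoal, hrot]
          simp

theorem apply_hash_spec : Claim_equal_apply_hash := by
  intro xs length pos _ hpre
  obtain ⟨hne, hlen⟩ := hpre
  have hn : 0 < xs.length := List.length_pos_of_ne_nil hne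
  have hguard : ¬ (length > (xs.length : Int) ∨ xs = []) := by
    rintro (h | h)
    · omega
    · exact hne h
  unfold Spec_apply_hash apply_hash apply_hash_alt
  rw [if_neg hguard, if_neg hguard]
  dsimp only
  set s := (PySem.Int.mod pos (xs.length : Int)).toNat with hsdef
  have hs : s < xs.length := by
    have h1 := PySem.Int.mod_lt pos (b := (xs.length : Int)) (by exact_mod_cast hn)
    have h2 := PySem.Int.mod_nonneg pos (b := (xs.length : Int)) (by exact_mod_cast hn)
    omega
  set k := length.toNat with hkdef
  have hk : k ≤ xs.length := by
    rw [hkdef]; exact Int.toNat_le.mpr hlen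
  have hrot : xs.drop s ++ xs.take s = xs.rotate s :=
    (List.rotate_eq_drop_append_take (Nat.le_of_lt hs)).symm
  have hrevlen : (((pvCollect xs s k).reverse)).length = k := by
    rw [List.length_reverse, pvCollect_eq k xs s hs hk]
    simp [List.length_rotate]; omega
  -- A's result, rotated by s
  have hA : (pvWrite xs s ((pvCollect xs s k).reverse)).rotate s
      = ((xs.rotate s).take k).reverse ++ (xs.rotate s).drop k := by
    rw [pvWrite_rotate _ xs s hs (by rw [hrevlen]; exact hk), hrevlen,
        pvCollect_eq k xs s hs hk]
  -- B's rotated2 equals the same list in both branches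
  have hB : (if length > 0 then
        ((xs.drop s ++ xs.take s).take k).reverse ++ (xs.drop s ++ xs.take s).drop k
      else xs.drop s ++ xs.take s)
      = ((xs.rotate s).take k).reverse ++ (xs.rotate s).drop k := by
    rw [hrot]
    split_ifs with hpos
    · rfl
    · have : k = 0 := by rw [hkdef]; omega
      simp [this]
  set G := ((xs.rotate s).take k).reverse ++ (xs.rotate s).drop k with hG
  have hGlen : G.length = xs.length := by
    rw [hG]; simp [List.length_rotate]; omega
  have hWlen : (pvWrite xs s ((pvCollect xs s k).reverse)).length = xs.length :=
    pvWrite_length ..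
  -- un-rotate: result = G.rotate (n - s), which is exactly B's drop/take split
  have hAval : pvWrite xs s ((pvCollect xs s k).reverse) = G.rotate (xs.length - s) := by
    have h1 : (pvWrite xs s ((pvCollect xs s k).reverse)).rotate s = G := hA
    have h2 := List.rotate_rotate (pvWrite xs s ((pvCollect xs s k).reverse)) s (xs.length - s)
    rw [h1] at h2
    have h3 : s + (xs.length - s) = xs.length := by omega
    have h4 : (pvWrite xs s ((pvCollect xs s k).reverse)).rotate xs.length
        = pvWrite xs s ((pvCollect xs s k).reverse) := by
      conv_lhs => rw [← hWlen]
      exact List.rotate_length _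
    rw [h3, h4] at h2
    exact h2.symm
  rw [hB, hAval]
  exact List.rotate_eq_drop_append_take (by omega)
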